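-- pv_equiv track=rewrite | github.com/tryber/sd-02-project-algorithms | challenges/challenge_study_schedule.py | best_hour
-- ===== SOURCE A (Python) =====
-- def study_schedule(start_time, end_time, target_time):
--     count = 0
--     for index, value in enumerate(start_time):
--         if target_time >= value and target_time <= end_time[index]:
--             count += 1
--     return count
--
-- def best_hour(start_time, end_time, time_length):
--     study_quantity = 0
--     current_hour = []
--     for time in range(0, time_length + 1):
--         quantity = study_schedule(start_time, end_time, time)
--         if study_quantity < quantity:
--             study_quantity = quantity
--             current_hour = [time]
--         elif study_quantity == quantity:
--             current_hour.append(time)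
--
--     return current_hour
-- ===== SOURCE B (Python) =====
-- def best_hour(start_time, end_time, time_length):
--     # difference array + prefix-sum sweep: O(n + T) instead of A's O(n * T)
--     if time_length < 0:
--         return []
--     diff = [0] * (time_length + 2)
--     for i, s in enumerate(start_time):
--         e = end_time[i]
--         lo = max(s, 0)
--         hi = min(e, time_length)
--         if lo <= hi:
--             diff[lo] += 1
--             diff[hi + 1] -= 1
--     best = 0
--     cur = 0
--     hours = []
--     for t in range(time_length + 1):
--         cur += diff[t]
--         if best < cur:
--             best = cur
--             hours = [t]
--         elif best == cur:
--             hours.append(t)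
--     return hours
-- ===== Notes on version B (the rewrite author's own statement) =====
-- stated objective: faster
-- what changed: B replaces A's per-hour rescan of all intervals (recounting overlaps for every time in 0..time_length) with a difference array built in one pass over the intervals followed by a single prefix-sum sweep that collects the argmax hours; Pre_ excludes inputs where end_time is shorter than start_time, on which A usually raises IndexError but can accidentally return a value via and-short-circuit when no queried hour reaches the extra start times, while B raises IndexError there.
-- outside the precondition, e.g. on best_hour([9], [], 1): A returns [0, 1], B raises IndexError; on best_hour([0, 0], [3], 2): A raises IndexError, B raises IndexError
import Mathlib
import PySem

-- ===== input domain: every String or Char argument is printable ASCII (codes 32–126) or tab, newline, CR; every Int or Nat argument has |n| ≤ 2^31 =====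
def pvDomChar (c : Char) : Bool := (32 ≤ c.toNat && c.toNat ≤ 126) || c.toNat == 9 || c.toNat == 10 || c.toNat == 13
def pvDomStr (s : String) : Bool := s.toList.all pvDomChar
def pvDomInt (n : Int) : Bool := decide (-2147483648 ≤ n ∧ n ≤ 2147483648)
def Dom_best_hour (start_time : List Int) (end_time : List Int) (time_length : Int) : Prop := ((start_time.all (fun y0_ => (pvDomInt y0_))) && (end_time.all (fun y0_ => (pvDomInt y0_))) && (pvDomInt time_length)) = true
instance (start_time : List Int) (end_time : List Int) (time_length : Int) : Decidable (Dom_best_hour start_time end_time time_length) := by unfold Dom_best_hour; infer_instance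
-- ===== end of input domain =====

-- B replaces A's per-hour rescan of all intervals with a difference array and one
-- prefix-sum sweep (O(n+T) instead of O(n*T)); equivalence is about the return value only.

-- ===== PORT A =====
def study_schedule (start_time : List Int) (end_time : List Int) (target_time : Int) : Int :=
  (PySem.List.enumerate start_time 0).foldl
    (fun count iv =>
      if target_time ≥ iv.2 ∧ target_time ≤ PySem.List.pyGetD end_time iv.1 0 then count + 1
      else count) 0

def aStep (start_time : List Int) (end_time : List Int) (st : Int × List Int) (time : Int) :
    Int × List Int :=
  let quantity := study_schedule start_time end_time time
  if st.1 < quantity then (quantity, [time])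
  else if st.1 = quantity then (st.1, st.2 ++ [time])
  else st

def best_hour (start_time : List Int) (end_time : List Int) (time_length : Int) : List Int :=
  ((PySem.List.pyRange 0 (time_length + 1) 1).foldl (aStep start_time end_time) (0, [])).2

-- ===== PORT B =====
-- indices written to the diff list are always in range (0 ≤ lo ≤ hi+1 ≤ time_length+1)
def bInterval (time_length : Int) (d : List Int) (p : Int × Int) : List Int :=
  let lo := max p.1 0
  let hi := min p.2 time_length
  if lo ≤ hi then
    let d1 := PySem.List.pySetD d lo (PySem.List.pyGetD d lo 0 + 1)
    PySem.List.pySetD d1 (hi + 1) (PySem.List.pyGetD d1 (hi + 1) 0 - 1)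
  else d

-- the loop body of Source B: iv = (i, s), e = end_time[i] (in range on every input in Pre_)
def bStart (time_length : Int) (end_time : List Int) (d : List Int) (iv : Int × Int) : List Int :=
  bInterval time_length d (iv.2, PySem.List.pyGetD end_time iv.1 0)

def bSweep (diff : List Int) (st : Int × Int × List Int) (t : Int) : Int × Int × List Int :=
  let cur := st.1 + PySem.List.pyGetD diff t 0
  if st.2.1 < cur then (cur, cur, [t])
  else if st.2.1 = cur then (cur, st.2.1, st.2.2 ++ [t])
  else (cur, st.2.1, st.2.2)

def best_hour_alt (start_time : List Int) (end_time : List Int) (time_length : Int) : List Int :=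
  if time_length < 0 then []
  else
    let diff := (PySem.List.enumerate start_time 0).foldl (bStart time_length end_time)
      (List.replicate (time_length + 2).toNat 0)
    ((PySem.List.pyRange 0 (time_length + 1) 1).foldl (bSweep diff) (0, 0, [])).2.2

-- ===== PRECONDITION & SPEC =====
-- Excluded: inputs with end_time shorter than start_time (and time_length ≥ 0), on which
-- A usually raises IndexError but can return a value via and-short-circuit when no queried
-- hour reaches the extra start times; B raises IndexError there.
def Pre_best_hour (start_time : List Int) (end_time : List Int) (time_length : Int) : Prop :=
  start_time.length ≤ end_time.length ∨ time_length < 0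
instance (start_time : List Int) (end_time : List Int) (time_length : Int) : Decidable (Pre_best_hour start_time end_time time_length) := by unfold Pre_best_hour; infer_instance

def pvWitness_best_hour : List Int × List Int × Int := ([1, 3, 2], [4, 5, 2], 6)

def Spec_best_hour (start_time : List Int) (end_time : List Int) (time_length : Int) (out : List Int) : Prop := out = best_hour_alt start_time end_time time_length
instance (start_time : List Int) (end_time : List Int) (time_length : Int) (out : List Int) : Decidable (Spec_best_hour start_time end_time time_length out) := by unfold Spec_best_hour; infer_instance

-- ===== CLAIM (what is proved, stated in full; the proofs are below) =====
def Claim_equal_best_hour : Prop := ∀ (start_time : List Int) (end_time : List Int) (time_length : Int), Dom_best_hour start_time end_time time_length → Pre_best_hour start_time end_time time_length → Spec_best_hour start_time end_time time_length (best_hour start_time end_time time_length)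

-- ===== LEMMAS AND PROOFS =====

-- A's inner loop counts the zipped pairs whose interval covers t.
theorem study_fold_count (e : List Int) (t : Int) :
    ∀ (s : List Int) (k : Nat) (c : Int), k + s.length ≤ e.length →
      (PySem.List.enumerate s (k : Int)).foldl
        (fun count iv =>
          if t ≥ iv.2 ∧ t ≤ PySem.List.pyGetD e iv.1 0 then count + 1 else count) c
      = c + (((s.zip (e.drop k)).countP (fun p => decide (t ≥ p.1 ∧ t ≤ p.2))) : Int) := by
  intro s
  induction s with
  | nil => intro k c _; simp [PySem.List.enumerate_nil]
  | cons a s ih =>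
    intro k c hk
    have hklt : k < e.length := by simp at hk; omega
    have hdrop : e.drop k = e[k] :: e.drop (k + 1) := List.drop_eq_getElem_cons hklt
    have hcast : ((k : Int) + 1) = ((k + 1 : Nat) : Int) := by push_cast; ring
    rw [PySem.List.enumerate_cons, hcast]
    have hk' : (k + 1) + s.length ≤ e.length := by simp at hk ⊢; omega
    rw [List.foldl_cons, ih (k + 1) _ hk', hdrop, List.zip_cons_cons, List.countP_cons]
    have hgetD : PySem.List.pyGetD e (k : Int) 0 = e[k] := by
      simp [PySem.List.pyGetD_natCast, List.getD_eq_getElem?_getD, hklt]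
    simp only [hgetD]
    by_cases hcond : t ≥ a ∧ t ≤ e[k] <;> simp [hcond] <;> push_cast <;> ring

theorem study_eq_countP (s e : List Int) (t : Int) (hlen : s.length ≤ e.length) :
    study_schedule s e t
      = (((s.zip e).countP (fun p => decide (t ≥ p.1 ∧ t ≤ p.2))) : Int) := by
  have := study_fold_count e t s 0 0 (by omega)
  simpa [study_schedule] using this

-- B's interval loop over enumerate+lookup equals the fold over the zipped pairs (in range).
theorem fold_enum_eq (e : List Int) (T : Int) :
    ∀ (s : List Int) (k : Nat) (d : List Int), k + s.length ≤ e.length →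
      (PySem.List.enumerate s (k : Int)).foldl (bStart T e) d
        = (s.zip (e.drop k)).foldl (bInterval T) d := by
  intro s
  induction s with
  | nil => intro k d _; simp [PySem.List.enumerate_nil]
  | cons a s ih =>
    intro k d hk
    have hklt : k < e.length := by simp at hk; omega
    have hdrop : e.drop k = e[k] :: e.drop (k + 1) := List.drop_eq_getElem_cons hklt
    have hcast : ((k : Int) + 1) = ((k + 1 : Nat) : Int) := by push_cast; ring
    rw [PySem.List.enumerate_cons, hcast]
    have hk' : (k + 1) + s.length ≤ e.length := by simp at hk ⊢; omega
    rw [List.foldl_cons, ih (k + 1) _ hk', hdrop, List.zip_cons_cons, List.foldl_cons]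
    have hgetD : PySem.List.pyGetD e (k : Int) 0 = e[k] := by
      simp [PySem.List.pyGetD_natCast, List.getD_eq_getElem?_getD, hklt]
    simp [bStart, hgetD]

theorem sum_take_set (d : List Int) (p k : Nat) (v : Int) (hp : p < d.length) :
    ((d.set p v).take k).sum = (d.take k).sum + (if p < k then v - d.getD p 0 else 0) := by
  induction d generalizing p k with
  | nil => simp at hp
  | cons a d ih =>
    cases p with
    | zero =>
      cases k with
      | zero => simp
      | succ k => simp [List.set_cons_zero]; ring
    | succ p =>
      cases k with
      | zero => simp
      | succ k =>
        have hp' : p < d.length := by simpa using hp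
        simp only [List.set_cons_succ, List.take_succ_cons, List.sum_cons, List.getD_cons_succ,
          ih p k hp', Nat.succ_lt_succ_iff]
        ring

theorem sum_take_succ (d : List Int) : ∀ (m : Nat), (d.take (m + 1)).sum = (d.take m).sum + d.getD m 0 := by
  induction d with
  | nil => intro m; simp
  | cons a d ih =>
    intro m
    cases m with
    | zero => simp
    | succ m => simp [List.take_succ_cons, ih m]; ring

theorem sum_take_replicate (n k : Nat) : ((List.replicate n (0 : Int)).take k).sum = 0 := by
  simp [List.take_replicate]

theorem bInterval_eq (T : Int) (d : List Int) (p : Int × Int) :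
    bInterval T d p =
      if max p.1 0 ≤ min p.2 T then
        ((d.set (max p.1 0).toNat (d.getD (max p.1 0).toNat 0 + 1)).set
          (min p.2 T + 1).toNat
          ((d.set (max p.1 0).toNat (d.getD (max p.1 0).toNat 0 + 1)).getD (min p.2 T + 1).toNat 0
            - 1))
      else d := by
  simp only [bInterval]
  split_ifs with h
  · rw [PySem.List.pyGetD_of_nonneg _ _ (le_max_right _ _),
      PySem.List.pySetD_of_nonneg _ _ (le_max_right _ _),
      PySem.List.pyGetD_of_nonneg _ _ (by omega),
      PySem.List.pySetD_of_nonneg _ _ (by omega)]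
  · rfl

theorem length_bInterval (T : Int) (d : List Int) (p : Int × Int) :
    (bInterval T d p).length = d.length := by
  rw [bInterval_eq]
  split_ifs <;> simp [List.length_set]

theorem bInterval_sum (T : Int) (hT : 0 ≤ T) (d : List Int) (hd : d.length = T.toNat + 2)
    (p : Int × Int) (t : Nat) (ht : (t : Int) ≤ T) :
    ((bInterval T d p).take (t + 1)).sum
      = (d.take (t + 1)).sum + (if (t : Int) ≥ p.1 ∧ (t : Int) ≤ p.2 then 1 else 0) := by
  rw [bInterval_eq]
  by_cases h : max p.1 0 ≤ min p.2 T
  · rw [if_pos h]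
    set d1 := d.set (max p.1 0).toNat (d.getD (max p.1 0).toNat 0 + 1) with hd1
    have hlen1 : d1.length = d.length := by rw [hd1, List.length_set]
    have hq2 : (min p.2 T + 1).toNat < d1.length := by rw [hlen1]; omega
    have hq1 : (max p.1 0).toNat < d.length := by omega
    rw [sum_take_set d1 _ _ _ hq2, hd1, sum_take_set d _ _ _ hq1]
    have e1 : d.getD (max p.1 0).toNat 0 + 1 - d.getD (max p.1 0).toNat 0 = 1 := by ring
    have e2 : d1.getD (min p.2 T + 1).toNat 0 - 1 - d1.getD (min p.2 T + 1).toNat 0 = -1 := by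
      ring
    rw [hd1] at e2
    rw [e1, e2]
    have hA : ((max p.1 0).toNat < t + 1) ↔ max p.1 0 ≤ (t : Int) := by
      rw [Nat.lt_succ_iff, Int.toNat_le]
    have hB : ((min p.2 T + 1).toNat < t + 1) ↔ min p.2 T + 1 ≤ (t : Int) := by
      rw [Nat.lt_succ_iff, Int.toNat_le]
    have hcond : ((t : Int) ≥ p.1 ∧ (t : Int) ≤ p.2)
        ↔ (max p.1 0 ≤ (t : Int) ∧ (t : Int) ≤ min p.2 T) := by
      rw [ge_iff_le, max_le_iff, le_min_iff]
      constructor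
      · intro hx; exact ⟨⟨hx.1, by positivity⟩, hx.2, ht⟩
      · intro hx; exact ⟨hx.1.1, hx.2.1⟩
    simp only [hA, hB, hcond]
    have hab := h
    generalize max p.1 0 = a at hab ⊢
    generalize min p.2 T = b at hab ⊢
    have hite : (if a ≤ (t : Int) then (1 : Int) else 0)
          + (if b + 1 ≤ (t : Int) then (-1 : Int) else 0)
        = (if a ≤ (t : Int) ∧ (t : Int) ≤ b then (1 : Int) else 0) := by
      split_ifs <;> omega
    rw [add_assoc, hite]
  · rw [if_neg h]
    have hc : ¬ ((t : Int) ≥ p.1 ∧ (t : Int) ≤ p.2) := by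
      intro hx
      exact h (le_trans (max_le hx.1 (by positivity)) (le_min hx.2 ht))
    rw [if_neg hc]
    ring

theorem diff_spec (T : Int) (hT : 0 ≤ T) (pairs : List (Int × Int)) :
    ∀ (d : List Int), d.length = T.toNat + 2 → ∀ (t : Nat), (t : Int) ≤ T →
      ((pairs.foldl (bInterval T) d).take (t + 1)).sum
        = (d.take (t + 1)).sum
          + ((pairs.countP (fun p => decide ((t : Int) ≥ p.1 ∧ (t : Int) ≤ p.2))) : Int) := by
  induction pairs with
  | nil => intro d _ t _; simp
  | cons p ps ih =>
    intro d hd t ht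
    have hd' : (bInterval T d p).length = T.toNat + 2 := by rw [length_bInterval]; exact hd
    rw [List.foldl_cons, ih _ hd' t ht, bInterval_sum T hT d hd p t ht, List.countP_cons]
    by_cases hc : (t : Int) ≥ p.1 ∧ (t : Int) ≤ p.2 <;> simp [hc] <;> push_cast <;> ring

-- The single sweep maintains cur = prefix sum and mirrors A's max-tracking state.
theorem sweep_spec (s e diff : List Int) (T : Int)
    (hdiff : ∀ (t : Nat), (t : Int) ≤ T → (diff.take (t + 1)).sum = study_schedule s e (t : Int)) :
    ∀ (m : Nat), (m : Int) ≤ T + 1 →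
      ((PySem.List.pyRange 0 (m : Int) 1).foldl (bSweep diff) (0, 0, [])).1
          = (diff.take m).sum
        ∧ ((PySem.List.pyRange 0 (m : Int) 1).foldl (bSweep diff) (0, 0, [])).2.1
          = ((PySem.List.pyRange 0 (m : Int) 1).foldl (aStep s e) (0, [])).1
        ∧ ((PySem.List.pyRange 0 (m : Int) 1).foldl (bSweep diff) (0, 0, [])).2.2
          = ((PySem.List.pyRange 0 (m : Int) 1).foldl (aStep s e) (0, [])).2 := by
  intro m
  induction m with
  | zero => intro _; simp [PySem.List.pyRange_one_eq_nil]
  | succ m ih =>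
    intro hm
    have hm' : (m : Int) ≤ T + 1 := by push_cast at hm ⊢; omega
    obtain ⟨ih1, ih2, ih3⟩ := ih hm'
    have hsplit : PySem.List.pyRange 0 ((m + 1 : Nat) : Int) 1
        = PySem.List.pyRange 0 (m : Int) 1 ++ [(m : Int)] := by
      push_cast
      exact PySem.List.pyRange_one_succ_right (by positivity)
    rw [hsplit, List.foldl_append, List.foldl_append]
    set B := (PySem.List.pyRange 0 (m : Int) 1).foldl (bSweep diff) (0, 0, []) with hB
    set A := (PySem.List.pyRange 0 (m : Int) 1).foldl (aStep s e) (0, []) with hA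
    have hq : B.1 + PySem.List.pyGetD diff (m : Int) 0 = study_schedule s e (m : Int) := by
      rw [ih1, PySem.List.pyGetD_natCast, List.getD_eq_getElem?_getD, ← List.getD_eq_getElem?_getD,
        ← sum_take_succ]
      exact hdiff m (by push_cast at hm; omega)
    simp only [List.foldl_cons, List.foldl_nil, bSweep, aStep, hq, ih2, ih3]
    split_ifs <;> simp_all

theorem best_hour_neg (s e : List Int) (T : Int) (hT : T < 0) :
    best_hour s e T = [] := by
  unfold best_hour
  rw [PySem.List.pyRange_one_eq_nil (by omega)]
  rfl

-- ===== VERDICT (by name: the statement is the Claim_ definition above) =====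
theorem best_hour_spec : Claim_equal_best_hour := by
  intro s e T _ hpre
  unfold Spec_best_hour
  by_cases hT : T < 0
  · rw [best_hour_neg s e T hT]
    unfold best_hour_alt
    rw [if_pos hT]
  · have hT' : 0 ≤ T := by omega
    have hlen : s.length ≤ e.length := by
      rcases hpre with h | h
      · exact h
      · omega
    unfold best_hour_alt
    rw [if_neg hT]
    have hfe := fold_enum_eq e T s 0 (List.replicate (T + 2).toNat 0) (by omega)
    simp only [Nat.cast_zero, List.drop_zero] at hfe
    rw [hfe]
    set diff := (s.zip e).foldl (bInterval T) (List.replicate (T + 2).toNat 0) with hdiffdef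
    have hrepl : (T + 2).toNat = T.toNat + 2 := by omega
    have hdiff : ∀ (t : Nat), (t : Int) ≤ T → (diff.take (t + 1)).sum = study_schedule s e (t : Int) := by
      intro t ht
      rw [hdiffdef, hrepl,
        diff_spec T hT' _ _ (by simp) t ht, sum_take_replicate,
        study_eq_countP s e (t : Int) hlen]
      ring
    have hm : (((T + 1).toNat : Nat) : Int) = T + 1 := by omega
    have := sweep_spec s e diff T hdiff (T + 1).toNat (by omega)
    rw [hm] at this
    unfold best_hour
    exact (this.2.2).symm
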